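-- pv_equiv track=rewrite | github.com/mauricioTechDev/daily-code-wars | python/tally-it-up.py | score_to_tally
-- ===== SOURCE A (Python) =====
-- def score_to_tally(score):
--     tally = ['a', 'b', 'c', 'd', 'e']
--     coll = 'e <br>'
--
--     if score < 6:
--         if score == 5:
--             return coll
--         else:
--             return tally[score-1]
--     while score >= 6:
--         score = score-5
--         if score <= 5:
--             if score == 5:
--                 coll += 'e <br>'
--                 break
--             else:
--                 coll +=  tally[score-1]
--                 break
--         else:
--             coll += 'e <br>'
--
--     return coll
-- ===== SOURCE B (Python) =====
-- def score_to_tally(score):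
--     if score <= 0:
--         return ''
--     q, r = divmod(score, 5)
--     return 'e <br>' * q + ('abcde'[r - 1] if r else '')
-- ===== Notes on version B (the rewrite author's own statement) =====
-- stated objective: faster
-- what changed: Replaces A's subtract-5 while loop with closed-form divmod(score,5) arithmetic building the tally in one string multiplication.
-- intended difference: For -4 <= score <= 0 A returns a letter produced by Python's negative-index wraparound into the tally list ('a'..'e'), while B returns '' , the intended empty tally for a nonpositive score. — e.g. on score_to_tally(0): A returns "e", B returns ""
import Mathlib
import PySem

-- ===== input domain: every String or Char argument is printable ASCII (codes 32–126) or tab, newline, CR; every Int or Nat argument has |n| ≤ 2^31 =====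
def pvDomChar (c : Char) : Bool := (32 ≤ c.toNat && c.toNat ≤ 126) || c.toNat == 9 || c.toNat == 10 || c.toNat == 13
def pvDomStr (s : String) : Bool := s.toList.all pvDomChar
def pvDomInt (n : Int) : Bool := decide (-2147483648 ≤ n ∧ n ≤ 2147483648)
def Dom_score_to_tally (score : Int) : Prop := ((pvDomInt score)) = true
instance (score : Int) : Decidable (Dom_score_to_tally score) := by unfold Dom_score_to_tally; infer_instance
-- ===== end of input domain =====

-- B replaces A's subtract-5 while loop by closed-form divmod arithmetic (measured faster, asymptotic).

-- ===== PORT A =====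
-- 'e <br>' as a character list (strings handled on the list side throughout)
def pvEC : List Char := ['e', ' ', '<', 'b', 'r', '>']
-- tally = ['a', 'b', 'c', 'd', 'e']
def pvTallyA : List (List Char) := [['a'], ['b'], ['c'], ['d'], ['e']]
-- the 'while score >= 6' loop of A, state = (score, coll)
def pvLoopA (score : Int) (coll : List Char) : List Char :=
  if _h : score ≥ 6 then
    if score - 5 ≤ 5 then
      if score - 5 = 5 then coll ++ pvEC
      else coll ++ ((PySem.List.pyGet? pvTallyA (score - 5 - 1)).getD [])
    else pvLoopA (score - 5) (coll ++ pvEC)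
  else coll
termination_by score.toNat
decreasing_by omega

def score_to_tally (score : Int) : String :=
  if score < 6 then
    if score = 5 then String.ofList pvEC
    else String.ofList ((PySem.List.pyGet? pvTallyA (score - 1)).getD [])
  else String.ofList (pvLoopA score pvEC)

-- ===== PORT B =====
-- 'e <br>' * q + ('abcde'[r-1] if r else '')  with q, r = divmod(score, 5)
def pvAltBody (score : Int) : List Char :=
  PySem.List.pyRepeat pvEC (PySem.Int.floordiv score 5) ++
    (if PySem.Int.mod score 5 = 0 then []
     else (PySem.List.pyGet? ['a', 'b', 'c', 'd', 'e'] (PySem.Int.mod score 5 - 1)).elim [] (fun c => [c]))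

def score_to_tally_alt (score : Int) : String :=
  if score ≤ 0 then "" else String.ofList (pvAltBody score)

-- ===== PRECONDITION & SPEC =====
-- Pre_ excludes score ≤ -5, where A raises IndexError (tally[score-1] out of range).
def Pre_score_to_tally (score : Int) : Prop := -4 ≤ score
instance (score : Int) : Decidable (Pre_score_to_tally score) := by unfold Pre_score_to_tally; infer_instance
def pvWitness_score_to_tally : Int := (7)

-- For -4 ≤ score ≤ 0 A returns a letter produced by Python's negative-index wraparound into the
-- tally list ('a'..'e'), while B returns '', the intended empty tally for a nonpositive score.
def D_score_to_tally (score : Int) : Prop := -4 ≤ score ∧ score ≤ 0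
instance (score : Int) : Decidable (D_score_to_tally score) := by unfold D_score_to_tally; infer_instance

def Spec_score_to_tally (score : Int) (out : String) : Prop :=
  ¬ D_score_to_tally score → out = score_to_tally_alt score
instance (score : Int) (out : String) : Decidable (Spec_score_to_tally score out) := by
  unfold Spec_score_to_tally; infer_instance

def pvDiffWitness_score_to_tally : Int := (0)
def pvDiffWitnessOut_score_to_tally : String × String := ("e", "")

-- ===== CLAIM (what is proved, stated in full; the proofs are below) =====
def Claim_unchanged_score_to_tally : Prop :=
  ∀ (score : Int), Dom_score_to_tally score → Pre_score_to_tally score →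
    Spec_score_to_tally score (score_to_tally score)
def Claim_changed_score_to_tally : Prop :=
  Dom_score_to_tally (pvDiffWitness_score_to_tally) ∧
  Pre_score_to_tally (pvDiffWitness_score_to_tally) ∧
  D_score_to_tally (pvDiffWitness_score_to_tally) ∧
  score_to_tally (pvDiffWitness_score_to_tally) = pvDiffWitnessOut_score_to_tally.1 ∧
  score_to_tally_alt (pvDiffWitness_score_to_tally) = pvDiffWitnessOut_score_to_tally.2 ∧
  pvDiffWitnessOut_score_to_tally.1 ≠ pvDiffWitnessOut_score_to_tally.2
def Claim_exact_score_to_tally : Prop :=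
  ∀ (score : Int), Dom_score_to_tally score → Pre_score_to_tally score →
    D_score_to_tally score → score_to_tally score ≠ score_to_tally_alt score

-- ===== LEMMAS AND PROOFS =====

-- one step of the closed form: for score ≥ 6 one 'e <br>' segment peels off
lemma pvRepeat_succ (xs : List Char) (n : Int) (h : 0 ≤ n) :
    PySem.List.pyRepeat xs (n + 1) = xs ++ PySem.List.pyRepeat xs n := by
  simp only [PySem.List.pyRepeat]
  have hn : (n + 1).toNat = n.toNat + 1 := by omega
  rw [hn, List.replicate_succ, List.flatten_cons]

lemma pvAltBody_step (t : Int) (h : 6 ≤ t) : pvAltBody t = pvEC ++ pvAltBody (t - 5) := by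
  have h5 : (0:Int) < 5 := by norm_num
  have hq : PySem.Int.floordiv t 5 = PySem.Int.floordiv (t - 5) 5 + 1 := by
    simp only [PySem.Int.floordiv_eq_ediv_of_pos h5]; omega
  have hr : PySem.Int.mod t 5 = PySem.Int.mod (t - 5) 5 := by
    simp only [PySem.Int.mod_eq_emod_of_pos h5]; omega
  have hq0 : 0 ≤ PySem.Int.floordiv (t - 5) 5 := by
    simp only [PySem.Int.floordiv_eq_ediv_of_pos h5]; omega
  unfold pvAltBody
  rw [hq, hr, pvRepeat_succ _ _ hq0, List.append_assoc]

-- base values of the closed form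
lemma pvAltBody_base (t : Int) (h1 : 1 ≤ t) (h5 : t ≤ 5) :
    pvAltBody t = if t = 5 then pvEC else (PySem.List.pyGet? pvTallyA (t - 1)).getD [] := by
  interval_cases t <;> decide

-- loop invariant: A's while loop produces coll ++ closed form of (score - 5)
lemma pvLoopA_eq : ∀ (n : Nat) (score : Int), score.toNat = n → 6 ≤ score →
    ∀ coll, pvLoopA score coll = coll ++ pvAltBody (score - 5) := by
  intro n
  induction n using Nat.strong_induction_on with
  | _ n ih =>
    intro score hn h coll
    rw [pvLoopA, dif_pos (by omega : score ≥ 6)]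
    by_cases hle : score - 5 ≤ 5
    · rw [if_pos hle, pvAltBody_base (score - 5) (by omega) hle]
      by_cases h55 : score - 5 = 5
      · rw [if_pos h55, if_pos h55]
      · rw [if_neg h55, if_neg h55]
    · rw [if_neg hle]
      rw [ih (score - 5).toNat (by omega) (score - 5) rfl (by omega) (coll ++ pvEC)]
      rw [pvAltBody_step (score - 5) (by omega), List.append_assoc]

-- ===== VERDICT (by name: the statement is the Claim_ definition above) =====
theorem score_to_tally_spec : Claim_unchanged_score_to_tally := by
  intro score _hDom hPre hD
  unfold Pre_score_to_tally at hPre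
  unfold D_score_to_tally at hD
  have h1 : 1 ≤ score := by omega
  by_cases h6 : score < 6
  · interval_cases score <;> decide
  · unfold score_to_tally score_to_tally_alt
    rw [if_neg h6, if_neg (by omega : ¬ score ≤ 0)]
    rw [pvLoopA_eq score.toNat score rfl (by omega) pvEC]
    rw [← pvAltBody_step score (by omega)]

theorem score_to_tally_changed : Claim_changed_score_to_tally := by
  unfold Claim_changed_score_to_tally; decide

theorem score_to_tally_tight : Claim_exact_score_to_tally := by
  intro score _ hPre hD
  unfold D_score_to_tally at hD
  unfold Pre_score_to_tally at hPre
  have h1 : -4 ≤ score := hD.1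
  have h2 : score ≤ 0 := hD.2
  interval_cases score <;> decide
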